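-- pv_equiv track=rewrite | github.com/gamma1947/CFG-course_project | functions.py | populate_dict
-- ===== SOURCE A (Python) =====
-- def populate_dict(dict, sequence, m, pseudocount):
--     window_size = m+1
--     for i in range(len(sequence)- window_size):
--         window_seq = sequence[i:i+window_size]
--         if window_seq in dict :
--             dict[window_seq] += 1
--     for key in dict:
--         dict[key] += pseudocount
--     return dict
-- ===== SOURCE B (Python) =====
-- def populate_dict(dict, sequence, m, pseudocount):
--     window_size = m + 1
--     limit = len(sequence) - window_size
--     return {key: value
--                  + sum(1 for i in range(limit) if sequence[i:i + window_size] == key)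
--                  + pseudocount
--             for key, value in dict.items()}
-- ===== Notes on version B (the rewrite author's own statement) =====
-- stated objective: alternative
-- what changed: B is a single dict comprehension that, per existing key, counts directly how many windows over A's exact range equal that key and adds it plus the pseudocount, replacing A's two in-place mutation loops (membership test + conditional increment, then a pseudocount pass); note A mutates its dict argument in place while B returns a fresh dict - the claim is about the return value. Pre_ excludes association lists with duplicate keys, which do not represent any Python dict.
import Mathlib
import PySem

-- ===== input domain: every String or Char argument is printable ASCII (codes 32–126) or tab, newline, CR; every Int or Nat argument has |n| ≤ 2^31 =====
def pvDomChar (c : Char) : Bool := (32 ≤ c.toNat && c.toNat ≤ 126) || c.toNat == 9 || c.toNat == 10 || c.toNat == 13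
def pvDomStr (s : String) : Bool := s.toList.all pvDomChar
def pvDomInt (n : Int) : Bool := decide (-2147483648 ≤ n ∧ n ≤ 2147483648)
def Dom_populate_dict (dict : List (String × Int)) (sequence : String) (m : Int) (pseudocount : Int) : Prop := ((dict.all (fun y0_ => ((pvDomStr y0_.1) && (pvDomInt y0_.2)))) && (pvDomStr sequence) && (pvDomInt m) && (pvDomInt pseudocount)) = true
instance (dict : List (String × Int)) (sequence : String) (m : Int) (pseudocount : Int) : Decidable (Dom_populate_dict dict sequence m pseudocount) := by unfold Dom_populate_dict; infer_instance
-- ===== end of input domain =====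

-- B replaces A's two in-place mutation loops by one dict comprehension that counts, per existing
-- key, the windows equal to it over A's exact range (alternative decomposition, no speed claim).
-- Side effect: Python A mutates its dict argument in place, B returns a fresh dict; the
-- equivalence proved here is about the RETURN value.

-- ===== PORT A =====
def populate_dict (dict : List (String × Int)) (sequence : String) (m : Int) (pseudocount : Int) : List (String × Int) :=
  let window_size := m + 1
  let d0 : PySem.Dict String Int := PySem.Dict.mk dict
  -- for i in range(len(sequence) - window_size): if window in dict: dict[window] += 1
  let d1 := (PySem.List.pyRange 0 (PySem.Str.len sequence - window_size) 1).foldl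
    (fun d i =>
      let window_seq := PySem.Str.slice sequence (some i) (some (i + window_size))
      if d.contains window_seq then d.modify window_seq 0 (· + 1) else d) d0
  -- for key in dict: dict[key] += pseudocount
  let d2 := d1.keys.foldl (fun d key => d.modify key 0 (· + pseudocount)) d1
  d2.items

-- ===== PORT B =====
def populate_dict_alt (dict : List (String × Int)) (sequence : String) (m : Int) (pseudocount : Int) : List (String × Int) :=
  let window_size := m + 1
  let limit := PySem.Str.len sequence - window_size
  -- {key: value + sum(1 for i in range(limit) if sequence[i:i+window_size] == key) + pseudocount
  --  for key, value in dict.items()}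
  dict.map (fun p =>
    (p.1, p.2
      + (PySem.List.pyRange 0 limit 1).foldl
          (fun acc i =>
            if PySem.Str.slice sequence (some i) (some (i + window_size)) = p.1
            then acc + 1 else acc) 0
      + pseudocount))

-- ===== PRECONDITION & SPEC =====
-- Pre_ excludes association lists with duplicate keys: they do not represent any Python dict
-- (A's argument is a dict, in which keys are unique), so the encoding is ambiguous there.
def Pre_populate_dict (dict : List (String × Int)) (sequence : String) (m : Int) (pseudocount : Int) : Prop :=
  (dict.map Prod.fst).Nodup
instance (dict : List (String × Int)) (sequence : String) (m : Int) (pseudocount : Int) : Decidable (Pre_populate_dict dict sequence m pseudocount) := by unfold Pre_populate_dict; infer_instance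

def pvWitness_populate_dict : (List (String × Int)) × String × Int × Int := ([("AB", 0), ("BA", 1)], "ABAB", 1, 2)

def Spec_populate_dict (dict : List (String × Int)) (sequence : String) (m : Int) (pseudocount : Int) (out : List (String × Int)) : Prop := out = populate_dict_alt dict sequence m pseudocount
instance (dict : List (String × Int)) (sequence : String) (m : Int) (pseudocount : Int) (out : List (String × Int)) : Decidable (Spec_populate_dict dict sequence m pseudocount out) := by unfold Spec_populate_dict; infer_instance

-- ===== CLAIM (what is proved, stated in full; the proofs are below) =====
def Claim_equal_populate_dict : Prop := ∀ (dict : List (String × Int)) (sequence : String) (m : Int) (pseudocount : Int), Dom_populate_dict dict sequence m pseudocount → Pre_populate_dict dict sequence m pseudocount → Spec_populate_dict dict sequence m pseudocount (populate_dict dict sequence m pseudocount)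

-- ===== LEMMAS AND PROOFS =====

-- A's first loop, over an arbitrary list of windows: keys unchanged.
theorem keys_foldl_condIncr (L : List String) (d : PySem.Dict String Int) :
    (L.foldl (fun d w => if d.contains w then d.modify w 0 (· + 1) else d) d).keys = d.keys := by
  induction L generalizing d with
  | nil => rfl
  | cons w rest ih =>
    simp only [List.foldl_cons]
    by_cases h : d.contains w = true
    · rw [if_pos h, ih, PySem.Dict.keys_modify, PySem.Dict.keys_insert_of_contains _ _ h]
    · rw [if_neg h]; exact ih d

-- A's first loop: value at k grows by the number of occurrences of k, when k is present.
theorem getD_foldl_condIncr (L : List String) (d : PySem.Dict String Int) (k : String) :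
    (L.foldl (fun d w => if d.contains w then d.modify w 0 (· + 1) else d) d).getD k 0
      = d.getD k 0 + (if d.contains k then (L.count k : Int) else 0) := by
  induction L generalizing d with
  | nil => simp
  | cons w rest ih =>
    simp only [List.foldl_cons]
    by_cases h : d.contains w = true
    · rw [if_pos h, ih, PySem.Dict.getD_modify, PySem.Dict.contains_modify]
      by_cases hk : k = w
      · subst hk
        simp [h]
        omega
      · simp only [if_neg hk]
        have hbw : (k == w) = false := by simp [hk]
        rw [hbw]
        simp only [Bool.false_or]
        by_cases hc : d.contains k = true
        · have hwk : (w == k) = false := by simp [Ne.symm hk]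
          simp [hc, List.count_cons, hwk]
        · simp [hc]
    · rw [if_neg h, ih]
      congr 1
      by_cases hc : d.contains k = true
      · have hwk : (w == k) = false := by
          simp only [beq_eq_false_iff_ne]
          exact fun e => h (e ▸ hc)
        simp [hc, List.count_cons, hwk]
      · simp [hc]

-- A's second loop: keys unchanged when every key of ks is present.
theorem keys_foldl_addPc (pc : Int) (ks : List String) (d : PySem.Dict String Int)
    (hc : ∀ k ∈ ks, d.contains k = true) :
    (ks.foldl (fun d key => d.modify key 0 (· + pc)) d).keys = d.keys := by
  induction ks generalizing d with
  | nil => rfl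
  | cons k0 rest ih =>
    simp only [List.foldl_cons]
    have h0 : d.contains k0 = true := hc k0 (by simp)
    have hkeys : (d.modify k0 0 (· + pc)).keys = d.keys := by
      rw [PySem.Dict.keys_modify, PySem.Dict.keys_insert_of_contains _ _ h0]
    rw [ih _ (fun k hk => by
        rw [PySem.Dict.contains_modify]
        simp [hc k (by simp [hk])]), hkeys]

-- A's second loop: each listed key gains pc exactly once (ks has no duplicates).
theorem getD_foldl_addPc (pc : Int) (ks : List String) (d : PySem.Dict String Int)
    (hnd : ks.Nodup) (k : String) :
    (ks.foldl (fun d key => d.modify key 0 (· + pc)) d).getD k 0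
      = d.getD k 0 + (if k ∈ ks then pc else 0) := by
  induction ks generalizing d with
  | nil => simp
  | cons k0 rest ih =>
    simp only [List.foldl_cons]
    obtain ⟨hk0, hndr⟩ := List.nodup_cons.mp hnd
    rw [ih _ hndr, PySem.Dict.getD_modify]
    by_cases hmem : k ∈ rest
    · have hne : k ≠ k0 := fun h => hk0 (h ▸ hmem)
      simp [hmem, hne]
    · by_cases hk : k = k0
      · subst hk; simp [hmem]
      · simp [hmem, hk]

-- B's inner sum: counting matching windows by a fold equals List.count on the window list.
theorem foldl_count_matches {A : Type} (f : A → String) (k : String) (L : List A) (a : Int) :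
    L.foldl (fun acc x => if f x = k then acc + 1 else acc) a = a + ((L.map f).count k : Int) := by
  induction L generalizing a with
  | nil => simp
  | cons x rest ih =>
    simp only [List.foldl_cons, List.map_cons, List.count_cons]
    by_cases h : f x = k
    · rw [if_pos h, ih]
      simp [h]
      omega
    · rw [if_neg h, ih]
      have : (f x == k) = false := by simp [h]
      simp [this]

-- the raw items of a literal dict
theorem items_mk (l : List (String × Int)) : (PySem.Dict.mk l).items = l := rfl

theorem keys_mk' (l : List (String × Int)) : (PySem.Dict.mk l).keys = l.map Prod.fst := rfl

-- ===== VERDICT (by name: the statement is the Claim_ definition above) =====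
theorem populate_dict_spec : Claim_equal_populate_dict := by
  intro dict sequence m pc _hdom hpre
  unfold Spec_populate_dict populate_dict populate_dict_alt
  simp only []
  set ws := m + 1 with hws
  set win : Int → String := fun i => PySem.Str.slice sequence (some i) (some (i + ws)) with hwin
  set L : List String := (PySem.List.pyRange 0 (PySem.Str.len sequence - ws) 1).map win with hL
  have hfoldA : ∀ d : PySem.Dict String Int,
      (PySem.List.pyRange 0 (PySem.Str.len sequence - ws) 1).foldl
        (fun d i => if d.contains (win i) then d.modify (win i) 0 (· + 1) else d) d
      = L.foldl (fun d w => if d.contains w then d.modify w 0 (· + 1) else d) d := by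
    intro d; rw [hL, List.foldl_map]
  rw [hfoldA]
  set d0 : PySem.Dict String Int := PySem.Dict.mk dict with hd0
  set d1 := L.foldl (fun d w => if d.contains w then d.modify w 0 (· + 1) else d) d0 with hd1
  set d2 := d1.keys.foldl (fun d key => d.modify key 0 (· + pc)) d1 with hd2
  have hk0 : d0.keys = dict.map Prod.fst := keys_mk' dict
  have hk1 : d1.keys = dict.map Prod.fst := by rw [hd1, keys_foldl_condIncr, hk0]
  have hnd1 : d1.keys.Nodup := by rw [hk1]; exact hpre
  have hc1 : ∀ k ∈ d1.keys, d1.contains k = true := by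
    intro k hk; exact (PySem.Dict.contains_iff_mem_keys d1 k).mpr hk
  have hk2 : d2.keys = dict.map Prod.fst := by
    rw [hd2, keys_foldl_addPc pc d1.keys d1 hc1, hk1]
  have hnd2 : d2.keys.Nodup := by rw [hk2]; exact hpre
  have hitems : d2.items = d2.keys.map (fun k => (k, d2.getD k 0)) :=
    PySem.Dict.items_eq_map_keys d2 hnd2 0
  rw [hitems, hk2, List.map_map]
  apply List.map_congr_left
  intro p hp
  have hpk : p.1 ∈ dict.map Prod.fst := List.mem_map.mpr ⟨p, hp, rfl⟩
  have hval0 : d0.getD p.1 0 = p.2 := by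
    have hmem : (p.1, p.2) ∈ d0.items := by rw [hd0, items_mk]; exact hp
    exact PySem.Dict.getD_of_mem_items d0 hmem (by rw [hk0]; exact hpre) 0
  have hc0 : d0.contains p.1 = true :=
    (PySem.Dict.contains_iff_mem_keys d0 p.1).mpr (by rw [hk0]; exact hpk)
  have hval1 : d1.getD p.1 0 = p.2 + (L.count p.1 : Int) := by
    rw [hd1, getD_foldl_condIncr, hval0, if_pos hc0]
  have hval2 : d2.getD p.1 0 = p.2 + (L.count p.1 : Int) + pc := by
    rw [hd2, getD_foldl_addPc pc d1.keys d1 hnd1, hval1, if_pos (by rw [hk1]; exact hpk)]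
  have hsum : (PySem.List.pyRange 0 (PySem.Str.len sequence - ws) 1).foldl
      (fun acc i => if win i = p.1 then acc + 1 else acc) (0 : Int) = (L.count p.1 : Int) := by
    rw [foldl_count_matches win p.1, hL]
    simp
  simp only [Function.comp]
  rw [hval2, ← hsum]
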